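-- pv_equiv track=rewrite | github.com/JosuaKugler/mpim_graphs | blobs.py | vertex_correction_labelled
-- ===== SOURCE A (Python) =====
-- three_partition = lambda n : [[a,b,n-(a+b)] for a in range(n+1) for b in range(n+1 - a)]
--
-- vertex_correction_labelled_values = {0:1}
--
-- def vertex_correction_labelled(n):
--     """
--     compute the number of possible graphs for n holes where three outer labelled vertices are given
--     """
--     try:
--         result = vertex_correction_labelled_values[n]
--     except:
--         result = 0
--         for partition in three_partition(n-1):
--             a,b,c = partition
--             result += vertex_correction_labelled(a) * vertex_correction_labelled(b) * vertex_correction_labelled(c)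
--         vertex_correction_labelled_values[n] = result
--     return result
-- ===== SOURCE B (Python) =====
-- def vertex_correction_labelled(n):
--     """
--     compute the number of possible graphs for n holes where three outer labelled vertices are given
--     """
--     if n < 0:
--         return 0
--     t = [1]                 # t[k] = answer for k holes
--     u = []                  # u[k] = sum(t[a] * t[k - a] for a in range(k + 1))
--     for m in range(1, n + 1):
--         u.append(sum(t[a] * t[m - 1 - a] for a in range(m)))
--         t.append(sum(u[m - 1 - c] * t[c] for c in range(m)))
--     return t[n]
-- ===== Notes on version B (the rewrite author's own statement) =====
-- stated objective: faster
-- what changed: Replaced the memoized top-down recursion over explicit three-partitions by a bottom-up O(n^2) dynamic program that maintains the self-convolution u = t*t incrementally, so t[m] is a single convolution of u with t instead of a double sum over all three-partitions; B also keeps no global memo dict.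
import Mathlib
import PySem

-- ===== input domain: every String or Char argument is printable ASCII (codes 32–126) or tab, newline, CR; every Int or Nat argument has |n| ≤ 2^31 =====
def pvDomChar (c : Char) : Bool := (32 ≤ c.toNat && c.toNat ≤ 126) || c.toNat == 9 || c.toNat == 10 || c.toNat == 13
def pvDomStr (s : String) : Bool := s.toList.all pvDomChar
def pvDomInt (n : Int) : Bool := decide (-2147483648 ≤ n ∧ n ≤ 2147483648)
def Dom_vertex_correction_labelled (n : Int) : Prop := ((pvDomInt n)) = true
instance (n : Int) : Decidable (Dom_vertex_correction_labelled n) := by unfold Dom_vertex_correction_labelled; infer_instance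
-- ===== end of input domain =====

-- B replaces A's memoized recursion over all three-partitions by a bottom-up DP that
-- maintains the self-convolution incrementally (O(n^2) instead of O(n^3) multiplications);
-- return values are identical. A also mutates a module-level memo dict; B does not — the
-- equivalence proved here is about the return value only.

-- ===== PORT A =====
-- three_partition = lambda n : [[a,b,n-(a+b)] for a in range(n+1) for b in range(n+1 - a)]
def threePartition (n : Int) : List (Int × Int × Int) :=
  (PySem.List.pyRange 0 (n + 1) 1).flatMap (fun a =>
    (PySem.List.pyRange 0 (n + 1 - a) 1).map (fun b => (a, b, n - (a + b))))

-- A's memoized recursion, memo dict seeded {0:1} and threaded through the calls exactly as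
-- Python mutates it; the fuel argument only makes the recursion total in Lean (n.toNat + 1
-- always suffices, proved below -- memo hits return without recursing).
def vclAmemo : Nat → Int → PySem.Dict Int Int → Int × PySem.Dict Int Int
  | 0, _, memo => (0, memo)
  | fuel + 1, n, memo =>
    match PySem.Dict.get? memo n with
    | some r => (r, memo)
    | none =>
      let rm := (threePartition (n - 1)).foldl
        (fun (acc : Int × PySem.Dict Int Int) p =>
          let r1m := vclAmemo fuel p.1 acc.2
          let r2m := vclAmemo fuel p.2.1 r1m.2
          let r3m := vclAmemo fuel p.2.2 r2m.2
          (acc.1 + r1m.1 * r2m.1 * r3m.1, r3m.2)) (0, memo)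
      (rm.1, PySem.Dict.insert rm.2 n rm.1)

def vertex_correction_labelled (n : Int) : Int :=
  (vclAmemo (n.toNat + 1) n (PySem.Dict.insert PySem.Dict.empty 0 1)).1

-- ===== PORT B =====
-- one iteration of Source B's loop body: append u[m-1] to u, then t[m] to t
def vclBstep (tu : List Int × List Int) (m : Int) : List Int × List Int :=
  let t := tu.1
  let u := tu.2
  let u' := u ++ [((PySem.List.pyRange 0 m 1).map
    (fun a => PySem.List.pyGetD t a 0 * PySem.List.pyGetD t (m - 1 - a) 0)).sum]
  let t' := t ++ [((PySem.List.pyRange 0 m 1).map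
    (fun c => PySem.List.pyGetD u' (m - 1 - c) 0 * PySem.List.pyGetD t c 0)).sum]
  (t', u')

def vertex_correction_labelled_alt (n : Int) : Int :=
  if n < 0 then 0
  else
    let tu := (PySem.List.pyRange 1 (n + 1) 1).foldl vclBstep ([1], [])
    PySem.List.pyGetD tu.1 n 0

-- ===== PRECONDITION & SPEC =====
def Spec_vertex_correction_labelled (n : Int) (out : Int) : Prop := out = vertex_correction_labelled_alt n
instance (n : Int) (out : Int) : Decidable (Spec_vertex_correction_labelled n out) := by unfold Spec_vertex_correction_labelled; infer_instance

-- ===== CLAIM (what is proved, stated in full; the proofs are below) =====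
def Claim_equal_vertex_correction_labelled : Prop := ∀ (n : Int), Dom_vertex_correction_labelled n → Spec_vertex_correction_labelled n (vertex_correction_labelled n)

-- ===== LEMMAS AND PROOFS =====

-- the mathematical sequence both programs compute, as a growing table Ttab m = [T 0, …, T m]
def Ttab : Nat → List Int
  | 0 => [1]
  | m + 1 =>
    let t := Ttab m
    t ++ [((List.range (m + 1)).map (fun a =>
      ((List.range (m + 1 - a)).map (fun b =>
        t.getD a 0 * t.getD b 0 * t.getD (m - a - b) 0)).sum)).sum]

def T (k : Nat) : Int := (Ttab k).getD k 0

def U (k : Nat) : Int := ((List.range (k + 1)).map (fun a => T a * T (k - a))).sum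

lemma Ttab_length (m : Nat) : (Ttab m).length = m + 1 := by
  induction m with
  | zero => rfl
  | succ m ih => simp [Ttab, ih]

lemma Ttab_getD (m k : Nat) (hk : k ≤ m) : (Ttab m).getD k 0 = T k := by
  induction m with
  | zero => interval_cases k; rfl
  | succ m ih =>
    rcases Nat.lt_or_ge k (m + 1) with h | h
    · rw [← ih (by omega)]
      show (Ttab (m + 1)).getD k 0 = (Ttab m).getD k 0
      rw [Ttab]
      simp only [List.getD, List.getElem?_append_left (by rw [Ttab_length]; omega)]
    · have hkm : k = m + 1 := by omega
      subst hkm; rfl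

lemma Ttab_getElem? (m k : Nat) (hk : k ≤ m) : (Ttab m)[k]?.getD 0 = T k := by
  simpa [List.getD] using Ttab_getD m k hk

lemma T_succ (m : Nat) :
    T (m + 1) = ((List.range (m + 1)).map (fun a =>
      ((List.range (m + 1 - a)).map (fun b =>
        T a * T b * T (m - a - b))).sum)).sum := by
  show (Ttab (m + 1)).getD (m + 1) 0 = _
  rw [Ttab]
  simp only [List.getD, List.getElem?_append_right (by rw [Ttab_length]; omega), Ttab_length]
  simp only [Nat.sub_self, List.getElem?_cons_zero, Option.getD_some]
  congr 1
  apply List.map_congr_left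
  intro a ha
  rw [List.mem_range] at ha
  congr 1
  apply List.map_congr_left
  intro b hb
  rw [List.mem_range] at hb
  rw [Ttab_getElem? m a (by omega), Ttab_getElem? m b (by omega),
    Ttab_getElem? m (m - a - b) (by omega)]

-- sum over an int range equals the corresponding Nat-range sum
lemma sum_pyRange_natCast (m : Nat) (f : Int → Int) :
    ((PySem.List.pyRange 0 (m : Int) 1).map f).sum
      = ((List.range m).map (fun k : Nat => f (k : Int))).sum := by
  rw [PySem.List.pyRange_one, List.map_map]
  have h : ((m : Int) - 0).toNat = m := by omega
  rw [h]
  congr 1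
  apply List.map_congr_left
  intro k _
  simp [Function.comp]

lemma sum_flatMap_int (l : List Int) (f : Int → List Int) :
    (l.flatMap f).sum = (l.map (fun a => (f a).sum)).sum := by
  induction l with
  | nil => simp
  | cons x t ih => simp [List.flatMap_cons, ih]

-- the value both programs compute, as a function of the input
def specF (n : Int) : Int := if n < 0 then 0 else T n.toNat

-- invariant of A's memo dict: every stored value is correct, and key 0 is present
def MemoOK (d : PySem.Dict Int Int) : Prop :=
  (∀ k v, d.get? k = some v → v = specF k) ∧ (d.get? 0).isSome

lemma specF_natCast (k : Nat) : specF (k : Int) = T k := by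
  rw [specF, if_neg (by omega)]
  norm_cast

lemma mem_threePartition {m : Int} {p : Int × Int × Int} (hp : p ∈ threePartition m) :
    0 ≤ p.1 ∧ p.1 ≤ m ∧ 0 ≤ p.2.1 ∧ p.2.1 ≤ m ∧ 0 ≤ p.2.2 ∧ p.2.2 ≤ m := by
  unfold threePartition at hp
  rw [List.mem_flatMap] at hp
  obtain ⟨a, ha, hp⟩ := hp
  rw [List.mem_map] at hp
  obtain ⟨b, hb, rfl⟩ := hp
  rw [PySem.List.mem_pyRange_one] at ha hb
  dsimp only
  omega

-- the sum A accumulates over three_partition(m) is the next table entry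
lemma sum_partitions (m : Nat) :
    ((threePartition (m : Int)).map (fun p => specF p.1 * specF p.2.1 * specF p.2.2)).sum
      = T (m + 1) := by
  rw [T_succ]
  unfold threePartition
  rw [List.map_flatMap, sum_flatMap_int]
  have h2 : (m : Int) + 1 = ((m + 1 : Nat) : Int) := by push_cast; ring
  rw [h2, sum_pyRange_natCast (m + 1)]
  congr 1
  apply List.map_congr_left
  intro a ha
  rw [List.mem_range] at ha
  simp only [List.map_map]
  have h3 : ((m + 1 : Nat) : Int) - (a : Int) = ((m + 1 - a : Nat) : Int) := by omega
  rw [h3, sum_pyRange_natCast (m + 1 - a)]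
  congr 1
  apply List.map_congr_left
  intro b hb
  rw [List.mem_range] at hb
  simp only [Function.comp_apply]
  have hc : (m : Int) - ((a : Int) + (b : Int)) = ((m - a - b : Nat) : Int) := by omega
  rw [hc, specF_natCast, specF_natCast, specF_natCast]

-- A's recursion with enough fuel returns specF and preserves the memo invariant
lemma vclAmemo_correct (fuel : Nat) : ∀ (n : Int) (memo : PySem.Dict Int Int),
    MemoOK memo → ((0 ≤ n → n.toNat < fuel) ∧ (n < 0 → 1 ≤ fuel)) →
    (vclAmemo fuel n memo).1 = specF n ∧ MemoOK (vclAmemo fuel n memo).2 := by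
  induction fuel with
  | zero =>
    intro n memo _ hf
    rcases lt_or_ge n 0 with h | h
    · exact absurd (hf.2 h) (by omega)
    · exact absurd (hf.1 h) (by omega)
  | succ f ihf =>
    intro n memo hm hf
    rcases hget : memo.get? n with _ | r
    · -- memo miss: run the loop
      have hn0 : n ≠ 0 := by
        intro h; subst h
        have h2 := hm.2
        rw [hget] at h2
        simp at h2
      have hloop : ∀ (l : List (Int × Int × Int)),
          (∀ p ∈ l, (0 ≤ p.1 ∧ p.1.toNat < f) ∧ (0 ≤ p.2.1 ∧ p.2.1.toNat < f)
            ∧ (0 ≤ p.2.2 ∧ p.2.2.toNat < f)) →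
          ∀ (acc : Int) (d : PySem.Dict Int Int), MemoOK d →
          (l.foldl (fun (acc : Int × PySem.Dict Int Int) p =>
              let r1m := vclAmemo f p.1 acc.2
              let r2m := vclAmemo f p.2.1 r1m.2
              let r3m := vclAmemo f p.2.2 r2m.2
              (acc.1 + r1m.1 * r2m.1 * r3m.1, r3m.2)) (acc, d)).1
              = acc + (l.map (fun p => specF p.1 * specF p.2.1 * specF p.2.2)).sum
            ∧ MemoOK (l.foldl (fun (acc : Int × PySem.Dict Int Int) p =>
              let r1m := vclAmemo f p.1 acc.2
              let r2m := vclAmemo f p.2.1 r1m.2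
              let r3m := vclAmemo f p.2.2 r2m.2
              (acc.1 + r1m.1 * r2m.1 * r3m.1, r3m.2)) (acc, d)).2 := by
        intro l
        induction l with
        | nil => intro _ acc d hd; simpa using hd
        | cons p l ihl =>
          intro hb acc d hd
          have hp := hb p (by simp)
          have hl : ∀ q ∈ l, (0 ≤ q.1 ∧ q.1.toNat < f) ∧ (0 ≤ q.2.1 ∧ q.2.1.toNat < f)
              ∧ (0 ≤ q.2.2 ∧ q.2.2.toNat < f) := fun q hq => hb q (by simp [hq])
          obtain ⟨h1, hd1⟩ := ihf p.1 d hd ⟨fun _ => hp.1.2, by omega⟩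
          obtain ⟨h2, hd2⟩ := ihf p.2.1 (vclAmemo f p.1 d).2 hd1 ⟨fun _ => hp.2.1.2, by omega⟩
          obtain ⟨h3, hd3⟩ := ihf p.2.2 (vclAmemo f p.2.1 (vclAmemo f p.1 d).2).2 hd2
            ⟨fun _ => hp.2.2.2, by omega⟩
          rw [List.foldl_cons]
          dsimp only
          obtain ⟨hfst, hsnd⟩ := ihl hl
            (acc + (vclAmemo f p.1 d).1 * (vclAmemo f p.2.1 (vclAmemo f p.1 d).2).1
              * (vclAmemo f p.2.2 (vclAmemo f p.2.1 (vclAmemo f p.1 d).2).2).1)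
            (vclAmemo f p.2.2 (vclAmemo f p.2.1 (vclAmemo f p.1 d).2).2).2 hd3
          refine ⟨?_, hsnd⟩
          rw [hfst, h1, h2, h3, List.map_cons, List.sum_cons]
          ring
      rcases lt_or_ge n 0 with hneg | hpos
      · -- negative n: empty partition list, result 0
        have hnil : threePartition (n - 1) = [] := by
          unfold threePartition
          rw [PySem.List.pyRange_one_eq_nil (by omega)]
          rfl
        simp only [vclAmemo, hget, hnil, List.foldl_nil]
        refine ⟨by simp [specF, hneg], ?_, ?_⟩
        · intro k v hkv
          rw [PySem.Dict.get?_insert] at hkv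
          split at hkv
          · next h => subst h; simp at hkv; simp [← hkv, specF, hneg]
          · exact hm.1 k v hkv
        · rw [PySem.Dict.get?_insert, if_neg (by omega)]
          exact hm.2
      · -- positive n (n = 0 is always a memo hit): the partition sum
        have h1n : 1 ≤ n := by omega
        have hbs : ∀ p ∈ threePartition (n - 1),
            (0 ≤ p.1 ∧ p.1.toNat < f) ∧ (0 ≤ p.2.1 ∧ p.2.1.toNat < f)
              ∧ (0 ≤ p.2.2 ∧ p.2.2.toNat < f) := by
          intro p hp
          have hb := mem_threePartition hp
          have hfn : n.toNat < f + 1 := hf.1 hpos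
          omega
        simp only [vclAmemo, hget]
        obtain ⟨hfst, hsnd⟩ := hloop (threePartition (n - 1)) hbs 0 memo hm
        have hsum : ((threePartition (n - 1)).map
            (fun p => specF p.1 * specF p.2.1 * specF p.2.2)).sum = T n.toNat := by
          have hcast : n - 1 = ((n.toNat - 1 : Nat) : Int) := by omega
          rw [hcast, sum_partitions (n.toNat - 1)]
          congr 1
          omega
        have hval : (List.foldl (fun (acc : Int × PySem.Dict Int Int) p =>
              let r1m := vclAmemo f p.1 acc.2
              let r2m := vclAmemo f p.2.1 r1m.2
              let r3m := vclAmemo f p.2.2 r2m.2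
              (acc.1 + r1m.1 * r2m.1 * r3m.1, r3m.2)) (0, memo) (threePartition (n - 1))).1
            = specF n := by
          rw [hfst, hsum, zero_add, specF, if_neg (by omega)]
        refine ⟨hval, ?_, ?_⟩
        · intro k v hkv
          rw [PySem.Dict.get?_insert] at hkv
          split at hkv
          · next h => subst h; rw [← hval]; simp_all
          · exact hsnd.1 k v hkv
        · rw [PySem.Dict.get?_insert]
          split
          · simp
          · exact hsnd.2
    · -- memo hit
      simp only [vclAmemo, hget]
      exact ⟨hm.1 n r hget, hm⟩

-- the convolution-of-convolution form B uses equals the triple-sum form A uses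
lemma conv_assoc (N : Nat) :
    ((List.range (N + 1)).map (fun k => U (N - k) * T k)).sum
      = ((List.range (N + 1)).map (fun a =>
          ((List.range (N + 1 - a)).map (fun b => T a * T b * T (N - a - b))).sum)).sum := by
  congr 1
  apply List.map_congr_left
  intro a ha
  rw [List.mem_range] at ha
  rw [U, ← List.sum_map_mul_right]
  have hrange : N - a + 1 = N + 1 - a := by omega
  rw [hrange]
  apply congrArg
  apply List.map_congr_left
  intro b hb
  rw [List.mem_range] at hb
  ring

-- appending the next table entry
lemma Ttab_succ (N : Nat) : Ttab (N + 1) = Ttab N ++ [T (N + 1)] := by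
  have h : Ttab (N + 1) = Ttab N ++ [((List.range (N + 1)).map (fun a =>
      ((List.range (N + 1 - a)).map (fun b =>
        (Ttab N).getD a 0 * (Ttab N).getD b 0 * (Ttab N).getD (N - a - b) 0)).sum)).sum] := rfl
  have h2 : T (N + 1) = ((List.range (N + 1)).map (fun a =>
      ((List.range (N + 1 - a)).map (fun b =>
        (Ttab N).getD a 0 * (Ttab N).getD b 0 * (Ttab N).getD (N - a - b) 0)).sum)).sum := by
    unfold T
    rw [h, List.getD_append_right _ _ _ _ (by simp [Ttab_length])]
    rw [Ttab_length]
    simp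
  rw [h, h2]

-- one B-loop iteration advances the invariant
lemma vclBstep_eq (N : Nat) :
    vclBstep (Ttab N, (List.range N).map U) ((N : Int) + 1)
      = (Ttab (N + 1), (List.range (N + 1)).map U) := by
  have hcast : ((N : Int) + 1) = ((N + 1 : Nat) : Int) := by push_cast; ring
  have hu : ((PySem.List.pyRange 0 ((N : Int) + 1) 1).map
      (fun a => PySem.List.pyGetD (Ttab N) a 0
        * PySem.List.pyGetD (Ttab N) ((N : Int) + 1 - 1 - a) 0)).sum = U N := by
    rw [hcast, sum_pyRange_natCast (N + 1), U]
    congr 1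
    apply List.map_congr_left
    intro k hk
    rw [List.mem_range] at hk
    have hidx : ((N + 1 : Nat) : Int) - 1 - (k : Int) = ((N - k : Nat) : Int) := by
      push_cast [Nat.cast_sub (by omega : k ≤ N)]; ring
    rw [hidx]
    simp only [PySem.List.pyGetD_natCast]
    rw [Ttab_getD N k (by omega), Ttab_getD N (N - k) (by omega)]
  have hu' : (List.range N).map U ++ [U N] = (List.range (N + 1)).map U := by
    rw [List.range_succ, List.map_append]; rfl
  have ht : ((PySem.List.pyRange 0 ((N : Int) + 1) 1).map
      (fun c => PySem.List.pyGetD ((List.range (N + 1)).map U) ((N : Int) + 1 - 1 - c) 0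
        * PySem.List.pyGetD (Ttab N) c 0)).sum = T (N + 1) := by
    rw [hcast, sum_pyRange_natCast (N + 1)]
    calc (List.map (fun k : Nat =>
            PySem.List.pyGetD ((List.range (N + 1)).map U) (((N + 1 : Nat) : Int) - 1 - (k : Int)) 0
              * PySem.List.pyGetD (Ttab N) ((k : Nat) : Int) 0) (List.range (N + 1))).sum
        = ((List.range (N + 1)).map (fun k : Nat => U (N - k) * T k)).sum := by
          congr 1
          apply List.map_congr_left
          intro k hk
          rw [List.mem_range] at hk
          have hidx : ((N + 1 : Nat) : Int) - 1 - (k : Int) = ((N - k : Nat) : Int) := by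
            push_cast [Nat.cast_sub (by omega : k ≤ N)]; ring
          rw [hidx]
          simp only [PySem.List.pyGetD_natCast]
          rw [Ttab_getD N k (by omega)]
          have hU : ((List.range (N + 1)).map U).getD (N - k) 0 = U (N - k) := by
            simp [List.getD, (by omega : N - k < N + 1)]
          rw [hU]
      _ = _ := by
          rw [conv_assoc N, ← T_succ N]
  unfold vclBstep
  simp only [hu, hu', ht]
  rw [Ttab_succ N]

-- B's loop invariant: after processing 1..N the pair is (Ttab N, [U 0, …, U (N-1)])
lemma vclB_loop (N : Nat) :
    (PySem.List.pyRange 1 ((N : Int) + 1) 1).foldl vclBstep ([1], [])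
      = (Ttab N, (List.range N).map U) := by
  induction N with
  | zero => rw [PySem.List.pyRange_one_eq_nil (by omega)]; rfl
  | succ N ih =>
    have hcast : ((N + 1 : Nat) : Int) + 1 = ((N : Int) + 1) + 1 := by push_cast; ring
    rw [hcast, PySem.List.pyRange_one_succ_right (a := 1) (b := (N : Int) + 1) (by omega),
      List.foldl_append, ih]
    simp only [List.foldl_cons, List.foldl_nil]
    exact vclBstep_eq N

-- ===== VERDICT (by name: the statement is the Claim_ definition above) =====
theorem vertex_correction_labelled_spec : Claim_equal_vertex_correction_labelled := by
  intro n _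
  unfold Spec_vertex_correction_labelled vertex_correction_labelled vertex_correction_labelled_alt
  have hinit : MemoOK (PySem.Dict.insert PySem.Dict.empty 0 1) := by
    constructor
    · intro k v hkv
      rw [PySem.Dict.get?_insert] at hkv
      split at hkv
      · next h =>
        subst h
        simp only [Option.some.injEq] at hkv
        subst hkv
        rfl
      · rw [PySem.Dict.get?_empty] at hkv
        exact absurd hkv (by simp)
    · rw [PySem.Dict.get?_insert, if_pos rfl]
      simp
  obtain ⟨hA, -⟩ := vclAmemo_correct (n.toNat + 1) n (PySem.Dict.insert PySem.Dict.empty 0 1)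
    hinit ⟨by omega, by omega⟩
  rw [hA]
  by_cases hn : n < 0
  · rw [if_pos hn]
    simp [specF, hn]
  · rw [Int.not_lt] at hn
    obtain ⟨N, hN⟩ : ∃ N : Nat, n = (N : Int) := ⟨n.toNat, by omega⟩
    subst hN
    rw [if_neg (by omega)]
    simp only [vclB_loop N]
    simp only [PySem.List.pyGetD_natCast]
    rw [Ttab_getD N N (le_refl N)]
    exact specF_natCast N
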